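-- pv_equiv track=rewrite | github.com/Antoha336/YoungAndYandex | Algorithm Training/1.0/3 Sets.py | task_e
-- ===== SOURCE A (Python) =====
-- def task_e(x, y, z, number):
--     buttons = {x, y, z}
--     digits = set()
--     while number > 0:
--         digits.add(number % 10)
--         number //= 10
--
--     well = digits.difference(buttons)
--     return len(well)
-- ===== SOURCE B (Python) =====
-- def task_e(x, y, z, number):
--     # Count, over the fixed digit alphabet 0..9, those digits that occur in
--     # number's decimal representation and are not on a button.
--     if number <= 0:
--         return 0
--     s = str(number)
--     return sum(1 for d in range(10) if str(d) in s and d not in (x, y, z))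
-- ===== Notes on version B (the rewrite author's own statement) =====
-- stated objective: alternative
-- what changed: Replaces the %10//10 loop that accumulates a digit set and the set difference by a scan over the fixed alphabet 0..9 that counts digits occurring as substrings of str(number) and not among the buttons; no set is built.
import Mathlib
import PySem

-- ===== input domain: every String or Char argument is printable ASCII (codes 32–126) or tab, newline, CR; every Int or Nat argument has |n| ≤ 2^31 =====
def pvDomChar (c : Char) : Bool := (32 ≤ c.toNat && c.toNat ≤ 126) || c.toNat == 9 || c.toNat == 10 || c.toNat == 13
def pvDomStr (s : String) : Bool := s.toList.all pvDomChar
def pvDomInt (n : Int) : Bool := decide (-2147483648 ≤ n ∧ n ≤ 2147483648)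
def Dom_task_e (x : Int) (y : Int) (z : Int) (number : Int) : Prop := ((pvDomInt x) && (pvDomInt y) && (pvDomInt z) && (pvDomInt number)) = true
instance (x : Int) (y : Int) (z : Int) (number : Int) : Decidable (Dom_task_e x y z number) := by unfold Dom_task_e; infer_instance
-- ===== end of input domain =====

-- B replaces A's %10-loop digit set and set difference by a count over the fixed
-- alphabet 0..9 of digits occurring in str(number) and not among the buttons (alternative, same cost).

-- ===== PORT A =====
-- the 'while number > 0' loop accumulating digits into a set
def taskELoop (digits : PySem.Set Int) (number : Int) : PySem.Set Int :=
  if _h : number > 0 then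
    taskELoop (PySem.Set.add digits (PySem.Int.mod number 10)) (PySem.Int.floordiv number 10)
  else digits
termination_by number.toNat
decreasing_by
  have : PySem.Int.floordiv number 10 = Int.fdiv number 10 := rfl
  rw [this]
  have h2 : Int.fdiv number 10 = number / 10 := by
    rcases Int.eq_ofNat_of_zero_le (le_of_lt _h) with ⟨m, rfl⟩
    exact_mod_cast (Int.ofNat_fdiv m 10).symm
  omega

def task_e (x : Int) (y : Int) (z : Int) (number : Int) : Int :=
  let buttons := PySem.Set.ofList [x, y, z]
  let digits := taskELoop PySem.Set.empty number
  PySem.Set.len (PySem.Set.diff digits buttons)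

-- ===== PORT B =====
def task_e_alt (x : Int) (y : Int) (z : Int) (number : Int) : Int :=
  if number ≤ 0 then 0
  else
    let s := PySem.Int.toChars number
    ((PySem.List.pyRange 0 10 1).countP
      (fun d => PySem.Chars.isIn (PySem.Int.toChars d) s
                  && !(d == x || d == y || d == z)) : Int)

-- ===== PRECONDITION & SPEC =====
def Spec_task_e (x : Int) (y : Int) (z : Int) (number : Int) (out : Int) : Prop := out = task_e_alt x y z number
instance (x : Int) (y : Int) (z : Int) (number : Int) (out : Int) : Decidable (Spec_task_e x y z number out) := by unfold Spec_task_e; infer_instance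

-- ===== CLAIM (what is proved, stated in full; the proofs are below) =====
def Claim_equal_task_e : Prop := ∀ (x : Int) (y : Int) (z : Int) (number : Int), Dom_task_e x y z number → Spec_task_e x y z number (task_e x y z number)

-- ===== LEMMAS AND PROOFS =====

theorem fdiv_natCast (m : Nat) : PySem.Int.floordiv (m : Int) 10 = ((m / 10 : Nat) : Int) :=
  (Int.ofNat_fdiv m 10).symm

theorem fmod_natCast (m : Nat) : PySem.Int.mod (m : Int) 10 = ((m % 10 : Nat) : Int) := by
  show ((m : Int)).fmod 10 = _
  rw [Int.fmod_eq_emod]; push_cast; simp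

-- membership of A's loop result: digits of number (base 10), on top of the accumulator
theorem taskELoop_mem (m : Nat) (s : PySem.Set Int) (a : Int) :
    a ∈ taskELoop s (m : Int) ↔ a ∈ s ∨ a ∈ (Nat.digits 10 m).map (fun d : Nat => (d : Int)) := by
  induction m using Nat.strong_induction_on generalizing s with
  | _ m ih =>
    rw [taskELoop]
    by_cases hm : 0 < m
    · have hpos : ((m : Int)) > 0 := by exact_mod_cast hm
      rw [dif_pos hpos]
      have hmod : PySem.Int.mod (m : Int) 10 = ((m % 10 : Nat) : Int) := fmod_natCast m
      have hdiv : PySem.Int.floordiv (m : Int) 10 = ((m / 10 : Nat) : Int) := fdiv_natCast m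
      rw [hmod, hdiv, ih (m / 10) (by omega)]
      rw [Nat.digits_def' (by norm_num) hm]
      simp [PySem.Set.mem_add]
      tauto
    · have : ¬ ((m : Int)) > 0 := by exact_mod_cast hm
      rw [dif_neg this]
      have : m = 0 := by omega
      subst this
      simp

theorem taskELoop_nodup (m : Nat) (s : PySem.Set Int) (hs : s.Nodup) :
    (taskELoop s (m : Int)).Nodup := by
  induction m using Nat.strong_induction_on generalizing s with
  | _ m ih =>
    rw [taskELoop]
    by_cases hm : 0 < m
    · have hpos : ((m : Int)) > 0 := by exact_mod_cast hm
      rw [dif_pos hpos, fdiv_natCast m]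
      exact ih (m / 10) (by omega) _ (PySem.Set.nodup_add _ _ hs)
    · have : ¬ ((m : Int)) > 0 := by exact_mod_cast hm
      rw [dif_neg this]; exact hs

-- Nat.toDigits agrees with Nat.digits (reversed, as digit characters) on positives
theorem toDigitsCore_eq_digits (f : Nat) : ∀ (m : Nat) (acc : List Char), m < f → 0 < m →
    Nat.toDigitsCore 10 f m acc = ((Nat.digits 10 m).map Nat.digitChar).reverse ++ acc := by
  induction f with
  | zero => intro m acc h; omega
  | succ f ih =>
    intro m acc hlt hm
    rw [Nat.toDigitsCore]
    by_cases h0 : m / 10 = 0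
    · rw [if_pos h0]
      have h10 : m < 10 := by omega
      rw [Nat.digits_def' (by norm_num) hm]
      have : Nat.digits 10 (m / 10) = [] := by rw [h0]; simp
      simp [this, Nat.mod_eq_of_lt h10]
    · rw [if_neg h0]
      rw [ih (m / 10) _ (by omega) (by omega)]
      rw [Nat.digits_def' (by norm_num) hm]
      simp

theorem toDigits_eq_digits (m : Nat) (hm : 0 < m) :
    Nat.toDigits 10 m = ((Nat.digits 10 m).map Nat.digitChar).reverse := by
  have := toDigitsCore_eq_digits (m + 1) m [] (by omega) hm
  simpa [Nat.toDigits] using this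

theorem digitChar_inj (d e : Nat) (hd : d < 10) (he : e < 10) :
    Nat.digitChar d = Nat.digitChar e → d = e := by
  interval_cases d <;> interval_cases e <;> simp [Nat.digitChar]

theorem singleton_infix_iff (c : Char) (l : List Char) : [c] <:+: l ↔ c ∈ l := by
  constructor
  · rintro ⟨s, t, rfl⟩; simp
  · intro h
    rcases List.append_of_mem h with ⟨s, t, rfl⟩
    exact ⟨s, t, by simp⟩

theorem toChars_small (d : Nat) (hd : d < 10) :
    PySem.Int.toChars (d : Int) = [Nat.digitChar d] := by
  have hnn : ¬ ((d : Int) < 0) := not_lt.mpr (Int.natCast_nonneg d)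
  simp only [PySem.Int.toChars, if_neg hnn, Int.toNat_natCast]
  rw [Nat.toDigits, Nat.toDigitsCore]
  simp [Nat.div_eq_of_lt hd, Nat.mod_eq_of_lt hd]

-- counting distinct elements: a nodup list L ⊆ R (R nodup) filtered by p has the
-- same length as R filtered by membership-in-L together with p
theorem length_filter_eq_countP {L R : List Int} (p : Int → Bool) (q : Int → Bool)
    (hL : L.Nodup) (hR : R.Nodup) (hsub : ∀ a ∈ L, a ∈ R)
    (hq : ∀ a ∈ R, q a = (decide (a ∈ L) && p a)) :
    (L.filter p).length = R.countP q := by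
  rw [List.countP_eq_length_filter]
  have hperm : (L.filter p).Perm (R.filter q) := by
    apply List.perm_of_nodup_nodup_toFinset_eq (hL.filter p) (hR.filter q)
    ext a
    simp only [List.mem_toFinset, List.mem_filter]
    constructor
    · rintro ⟨ha, hp⟩
      have haR := hsub a ha
      refine ⟨haR, ?_⟩
      rw [hq a haR]; simp [ha, hp]
    · rintro ⟨haR, hqa⟩
      rw [hq a haR] at hqa
      simp only [Bool.and_eq_true, decide_eq_true_eq] at hqa
      exact ⟨hqa.1, hqa.2⟩
  exact hperm.length_eq

theorem task_e_eq (x y z number : Int) : task_e x y z number = task_e_alt x y z number := by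
  by_cases hn : number ≤ 0
  · have h0 : ¬ number > 0 := by omega
    rw [task_e, task_e_alt, if_pos hn, taskELoop, dif_neg h0]
    rfl
  · rw [not_le] at hn
    rcases Int.eq_ofNat_of_zero_le (le_of_lt hn) with ⟨m, rfl⟩
    have hm : 0 < m := by exact_mod_cast hn
    rw [task_e, task_e_alt, if_neg (by omega)]
    simp only [PySem.Set.len, PySem.Set.diff]
    have hrange : PySem.List.pyRange 0 10 1 = [0,1,2,3,4,5,6,7,8,9] := by decide
    rw [hrange]
    norm_cast
    apply length_filter_eq_countP
    · exact taskELoop_nodup m PySem.Set.empty (by simp [PySem.Set.empty])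
    · decide
    · intro a ha
      rw [taskELoop_mem] at ha
      simp only [PySem.Set.empty, List.not_mem_nil, false_or, List.mem_map] at ha
      obtain ⟨d, hd, rfl⟩ := ha
      have hdd : d < 10 := Nat.digits_lt_base (show (1:Nat) < 10 by norm_num) hd
      interval_cases d <;> decide
    · intro a ha
      -- a is one of 0..9; identify its toChars and relate membership
      have hb : 0 ≤ a ∧ a < 10 := by
        simp only [List.mem_cons, List.not_mem_nil, or_false] at ha
        rcases ha with rfl|rfl|rfl|rfl|rfl|rfl|rfl|rfl|rfl|rfl <;> norm_num
      obtain ⟨d, rfl⟩ : ∃ d : Nat, a = (d : Int) :=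
        ⟨a.toNat, (Int.toNat_of_nonneg hb.1).symm⟩
      have hd : d < 10 := by exact_mod_cast hb.2
      have htc : PySem.Int.toChars ((d : Nat) : Int) = [Nat.digitChar d] := toChars_small d hd
      have htn : PySem.Int.toChars ((m : Nat) : Int) = Nat.toDigits 10 m := by
        simp [PySem.Int.toChars, not_lt.mpr (Int.natCast_nonneg m)]
      congr 1
      have hmemR : ((d : Int) ∈ taskELoop PySem.Set.empty (m : Int)) ↔ d ∈ Nat.digits 10 m := by
        rw [taskELoop_mem]
        simp only [PySem.Set.empty, List.not_mem_nil, false_or]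
        exact List.mem_map_of_injective (fun a b h => by exact_mod_cast h)
      have hmemL : PySem.Chars.isIn (PySem.Int.toChars ((d : Nat) : Int)) (PySem.Int.toChars ((m : Nat) : Int)) = true
          ↔ d ∈ Nat.digits 10 m := by
        rw [htc, htn, PySem.Chars.isIn_iff_infix, singleton_infix_iff,
            toDigits_eq_digits m hm, List.mem_reverse]
        constructor
        · intro h
          rcases List.mem_map.mp h with ⟨e, he, hde⟩
          have hee : e < 10 := Nat.digits_lt_base (show (1:Nat) < 10 by norm_num) he
          rwa [← digitChar_inj e d hee hd hde]
        · intro h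
          exact List.mem_map.mpr ⟨d, h, rfl⟩
      have hiff := hmemL.trans hmemR.symm
      have hIs : PySem.Chars.isIn (PySem.Int.toChars ((d : Nat) : Int)) (PySem.Int.toChars ((m : Nat) : Int))
          = decide (((d : Nat) : Int) ∈ taskELoop PySem.Set.empty ((m : Nat) : Int)) := by
        by_cases hc : ((d : Nat) : Int) ∈ taskELoop PySem.Set.empty ((m : Nat) : Int)
        · rw [hiff.mpr hc, decide_eq_true hc]
        · rw [decide_eq_false hc]
          exact Bool.eq_false_iff.mpr (fun hh => hc (hiff.mp hh))
      rw [hIs]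
      congr 1
      rw [Bool.eq_iff_iff]
      simp [PySem.Set.mem_ofList]
      tauto

-- ===== VERDICT (by name: the statement is the Claim_ definition above) =====
theorem task_e_spec : Claim_equal_task_e := by
  intro x y z number _
  unfold Spec_task_e
  exact task_e_eq x y z number
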